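-- pv_equiv track=rewrite | github.com/AFeuillet/AOC | Euler/061.py | converta
-- ===== SOURCE A (Python) =====
-- def converta(lista):
-- 	nset = {}
-- 	for a in lista:
-- 		a = str(a)
-- 		f = a[:2]
-- 		s = a[-2:]
-- 		if f in nset:
-- 			nset[f].append(s)
-- 		else:
-- 			nset[f] = [s]
-- 	return nset
-- ===== SOURCE B (Python) =====
-- def converta(lista):
--     # Build (first2, last2) pairs once, then group by first-occurrence key order
--     # with one filter pass per distinct key (instead of incremental dict mutation).
--     items = [(str(a)[:2], str(a)[-2:]) for a in lista]
--     keys = list(dict.fromkeys(f for f, _ in items))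
--     return {f: [s for g, s in items if g == f] for f in keys}
-- ===== Notes on version B (the rewrite author's own statement) =====
-- stated objective: alternative
-- what changed: Replaced the incremental dict-mutation loop by a declarative pipeline: build all (first2,last2) pairs, deduplicate keys in first-occurrence order, then assemble each group's value list with a per-key filter pass.
import Mathlib
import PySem

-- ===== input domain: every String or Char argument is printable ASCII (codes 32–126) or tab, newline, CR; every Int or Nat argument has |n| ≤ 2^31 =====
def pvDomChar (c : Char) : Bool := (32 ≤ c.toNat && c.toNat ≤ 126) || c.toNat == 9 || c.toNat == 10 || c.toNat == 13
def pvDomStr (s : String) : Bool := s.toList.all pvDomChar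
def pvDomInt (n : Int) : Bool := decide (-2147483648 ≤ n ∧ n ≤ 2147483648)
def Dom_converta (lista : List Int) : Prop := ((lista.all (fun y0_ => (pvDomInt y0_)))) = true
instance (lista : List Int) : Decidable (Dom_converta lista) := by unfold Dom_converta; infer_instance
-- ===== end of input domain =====

-- B replaces A's incremental dict-mutation loop by a build-pairs / dedup-keys / per-key-filter pipeline; same cost class, no speed claim.

-- ===== PORT A =====
def converta (lista : List Int) : List (String × List String) :=
  (lista.foldl (fun nset a =>
      let a' := PySem.Int.toStr a
      let f := PySem.Str.slice a' none (some 2)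
      let s := PySem.Str.slice a' (some (-2)) none
      if nset.contains f then nset.modify f [] (· ++ [s]) else nset.insert f [s])
    PySem.Dict.empty).items

-- ===== PORT B =====
def converta_alt (lista : List Int) : List (String × List String) :=
  let items := lista.map (fun a =>
    (PySem.Str.slice (PySem.Int.toStr a) none (some 2),
     PySem.Str.slice (PySem.Int.toStr a) (some (-2)) none))
  let keys := PySem.List.dedup (items.map (·.1))
  keys.map (fun f => (f, (items.filter (fun p => p.1 == f)).map (·.2)))

-- ===== PRECONDITION & SPEC =====
def Spec_converta (lista : List Int) (out : List (String × List String)) : Prop :=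
  out = converta_alt lista
instance (lista : List Int) (out : List (String × List String)) : Decidable (Spec_converta lista out) := by
  unfold Spec_converta; infer_instance

-- ===== CLAIM =====
def Claim_equal_converta : Prop := ∀ (lista : List Int), Dom_converta lista → Spec_converta lista (converta lista)

-- ===== LEMMAS AND PROOFS =====
-- A's if/else over contains is exactly Python's d.modify (append to d.get(f, []))
theorem converta_step_eq (d : PySem.Dict String (List String)) (f s : String) :
    (if d.contains f then d.modify f [] (· ++ [s]) else d.insert f [s]) = d.modify f [] (· ++ [s]) := by
  by_cases h : d.contains f = true
  · simp [h]
  · simp only [Bool.not_eq_true] at h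
    simp [h, PySem.Dict.modify, PySem.Dict.getD_of_not_contains _ _ h]

-- ===== VERDICT =====
theorem converta_spec : Claim_equal_converta := by
  intro lista _
  unfold Spec_converta converta converta_alt
  simp only []
  set item : Int → String × String := fun a =>
    (PySem.Str.slice (PySem.Int.toStr a) none (some 2),
     PySem.Str.slice (PySem.Int.toStr a) (some (-2)) none) with hitem
  have h1 : lista.foldl (fun nset a =>
      let a' := PySem.Int.toStr a
      let f := PySem.Str.slice a' none (some 2)
      let s := PySem.Str.slice a' (some (-2)) none
      if nset.contains f then nset.modify f [] (· ++ [s]) else nset.insert f [s])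
      PySem.Dict.empty
      = (lista.map item).foldl (fun d p => d.modify p.1 [] (· ++ [p.2])) PySem.Dict.empty := by
    rw [List.foldl_map]
    exact PySem.List.foldl_congr_mem _ _ _ _ (fun d a _ => converta_step_eq d _ _)
  rw [h1]
  set D := (lista.map item).foldl (fun d p => d.modify p.1 [] (· ++ [p.2])) PySem.Dict.empty with hD
  have hkeys : D.keys = PySem.List.dedup ((lista.map item).map (·.1)) := by
    rw [hD]
    have := PySem.Dict.keys_foldl_modify_key (lista.map item) (·.1) ([] : List String)
      (fun _ p => (· ++ [p.2])) PySem.Dict.empty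
    rw [this, PySem.List.dedup_eq_ofList]
    rfl
  have hnd : D.keys.Nodup := by
    rw [hD]
    exact PySem.Dict.nodup_keys_foldl_modify_key (lista.map item) (·.1) ([] : List String)
      (fun _ p => (· ++ [p.2])) PySem.Dict.empty (by simp [PySem.Dict.keys_empty])
  rw [PySem.Dict.items_eq_map_keys D hnd ([] : List String), hkeys]
  apply List.map_congr_left
  intro f _
  have := PySem.Dict.getD_foldl_modify_append (lista.map item) PySem.Dict.empty f
  rw [← hD] at this
  simp [this, PySem.Dict.getD_empty]
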